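-- pv_equiv track=rewrite | github.com/petervarkoly/cranix-web | src/create-icon-import.py | convert_to_camel
-- ===== SOURCE A (Python) =====
-- def convert_to_camel(a):
--     n  = ""
--     up = False
--     for i in a:
--         if i == '-':
--             up = True
--             continue
--         if up:
--             n += i.upper()
--             up = False
--         else:
--             n += i
--     return n
-- ===== SOURCE B (Python) =====
-- def convert_to_camel(a):
--     parts = a.split('-')
--     return parts[0] + ''.join(p[:1].upper() + p[1:] for p in parts[1:])
-- ===== Notes on version B (the rewrite author's own statement) =====
-- stated objective: idiomatic
-- what changed: Replaced the flag-driven character-by-character scan that appends to a string with a split-on-hyphen, capitalize-first-letter-of-later-parts, join decomposition.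
import Mathlib
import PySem

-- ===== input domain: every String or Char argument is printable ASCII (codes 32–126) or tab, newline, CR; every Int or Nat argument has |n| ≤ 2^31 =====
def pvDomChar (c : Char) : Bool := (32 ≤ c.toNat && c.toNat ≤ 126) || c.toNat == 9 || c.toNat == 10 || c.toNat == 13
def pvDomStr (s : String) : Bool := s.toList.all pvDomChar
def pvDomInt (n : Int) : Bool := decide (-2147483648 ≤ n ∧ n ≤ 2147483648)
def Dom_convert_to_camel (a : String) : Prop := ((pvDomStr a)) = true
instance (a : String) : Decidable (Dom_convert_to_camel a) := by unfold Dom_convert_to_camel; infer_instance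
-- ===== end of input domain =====

-- B replaces A's flag-driven single-pass scan with a split('-') / capitalize-first / join decomposition (idiomatic, same cost).
-- B replaces A's flag-driven single-pass scan with a split('-') / capitalize-first / join decomposition (idiomatic, same cost).
-- ===== PORT A =====
def convert_to_camel (a : String) : String :=
  String.mk (a.toList.foldl (fun (s : List Char × Bool) i =>
    if i = '-' then (s.1, true)
    else if s.2 then (s.1 ++ [PySem.Chars.upperChar i], false)
    else (s.1 ++ [i], false)) ([], false)).1

-- ===== PORT B =====
-- p[:1].upper() + p[1:] on each later part, joined after parts[0]
def convert_to_camel_alt (a : String) : String :=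
  let parts := PySem.Chars.splitOn a.toList ['-']
  String.mk (parts.headD [] ++
    PySem.Chars.join [] ((parts.drop 1).map (fun p =>
      PySem.Chars.upper (PySem.List.slice p none (some 1)) ++ PySem.List.slice p (some 1) none)))

-- ===== PRECONDITION & SPEC =====
def Spec_convert_to_camel (a : String) (out : String) : Prop := out = convert_to_camel_alt a
instance (a : String) (out : String) : Decidable (Spec_convert_to_camel a out) := by unfold Spec_convert_to_camel; infer_instance

-- ===== CLAIM (what is proved, stated in full; the proofs are below) =====
def Claim_equal_convert_to_camel : Prop := ∀ (a : String), Dom_convert_to_camel a → Spec_convert_to_camel a (convert_to_camel a)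

-- ===== LEMMAS AND PROOFS =====

-- accumulator-free form of Python's split on the single-char separator '-'
def pvSp : List Char → List (List Char)
  | [] => [[]]
  | c :: t => if c = '-' then [] :: pvSp t else (c :: (pvSp t).headD []) :: (pvSp t).tail

theorem pvSp_ne_nil (cs : List Char) : pvSp cs ≠ [] := by
  cases cs with
  | nil => simp [pvSp]
  | cons c t => simp only [pvSp]; split <;> simp

theorem pvSp_cons_head_tail (cs : List Char) : pvSp cs = (pvSp cs).headD [] :: (pvSp cs).tail :=
  (List.cons_head?_tail (by
    cases h : pvSp cs with
    | nil => exact absurd h (pvSp_ne_nil cs)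
    | cons a b => simp)).symm

theorem splitOn_go_eq (l : List Char) : ∀ (fuel : Nat), l.length ≤ fuel →
    ∀ (cur : List Char) (acc : List (List Char)),
    PySem.Chars.splitOn.go ['-'] fuel l cur acc
      = acc.reverse ++ ((cur.reverse ++ (pvSp l).headD []) :: (pvSp l).tail) := by
  induction l with
  | nil =>
    intro fuel _ cur acc
    cases fuel <;> simp [PySem.Chars.splitOn.go, pvSp]
  | cons c t ih =>
    intro fuel hf cur acc
    cases fuel with
    | zero => simp at hf
    | succ n =>
      by_cases hc : c = '-'
      · subst hc
        have step : PySem.Chars.splitOn.go ['-'] (n+1) ('-'::t) cur acc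
            = PySem.Chars.splitOn.go ['-'] n t [] (cur.reverse :: acc) := by
          simp [PySem.Chars.splitOn.go, List.isPrefixOf]
        rw [step, ih n (by simp at hf; omega) [] (cur.reverse :: acc),
          show pvSp ('-'::t) = [] :: pvSp t from by simp [pvSp]]
        simp only [List.reverse_nil, List.nil_append]
        conv_lhs => rw [← pvSp_cons_head_tail t]
        simp
      · have step : PySem.Chars.splitOn.go ['-'] (n+1) (c::t) cur acc
            = PySem.Chars.splitOn.go ['-'] n t (c::cur) acc := by
          simp [PySem.Chars.splitOn.go, List.isPrefixOf]
          intro h; exact absurd h.symm hc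
        have hf' : t.length ≤ n := by simpa [Nat.succ_le_succ_iff] using hf
        rw [step, ih n hf' (c::cur) acc]
        simp [pvSp, hc]

theorem splitOn_eq_pvSp (cs : List Char) : PySem.Chars.splitOn cs ['-'] = pvSp cs := by
  unfold PySem.Chars.splitOn
  rw [splitOn_go_eq cs (cs.length + 1) (by omega) [] []]
  simpa using (pvSp_cons_head_tail cs).symm

-- the capitalize-first helper of B, as a pure cons-case function
def pvCap (p : List Char) : List Char :=
  PySem.Chars.upper (PySem.List.slice p none (some 1)) ++ PySem.List.slice p (some 1) none

theorem pvCap_nil : pvCap [] = [] := by decide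

theorem pvCap_cons (c : Char) (t : List Char) : pvCap (c :: t) = PySem.Chars.upperChar c :: t := by
  unfold pvCap
  rw [PySem.List.slice_to (xs := c :: t) (by omega), PySem.List.slice_from_one]
  simp [PySem.Chars.upper]

theorem join_nil_eq_flatten (l : List (List Char)) : PySem.Chars.join [] l = l.flatten := by
  induction l with
  | nil => rfl
  | cons a t ih => simp [PySem.Chars.join, List.intercalate] at ih ⊢; cases t <;> simp_all

-- A's loop as a pure function of the remaining input and the up-flag
def pvCamr : Bool → List Char → List Char
  | _, [] => []
  | up, c :: t =>
    if c = '-' then pvCamr true t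
    else (if up then PySem.Chars.upperChar c else c) :: pvCamr false t

theorem foldl_eq_pvCamr (cs : List Char) : ∀ (acc : List Char) (up : Bool),
    (cs.foldl (fun (s : List Char × Bool) i =>
      if i = '-' then (s.1, true)
      else if s.2 then (s.1 ++ [PySem.Chars.upperChar i], false)
      else (s.1 ++ [i], false)) (acc, up)).1 = acc ++ pvCamr up cs := by
  induction cs with
  | nil => intro acc up; simp [pvCamr]
  | cons c t ih =>
    intro acc up
    by_cases hc : c = '-'
    · subst hc; simp only [List.foldl_cons, pvCamr, if_pos]; exact ih acc true
    · cases up <;> simp only [List.foldl_cons, pvCamr, if_neg hc, Bool.false_eq_true, if_false,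
        if_true] <;> rw [ih] <;> simp

theorem pvB_eq_pvCamr (cs : List Char) :
    ((pvSp cs).headD [] ++ ((pvSp cs).tail.map pvCap).flatten = pvCamr false cs)
    ∧ (((pvSp cs).map pvCap).flatten = pvCamr true cs) := by
  induction cs with
  | nil => simp [pvSp, pvCamr, pvCap_nil]
  | cons c t ih =>
    by_cases hc : c = '-'
    · subst hc
      simp only [pvSp, pvCamr]
      exact ⟨ih.2, ih.2⟩
    · constructor
      · simp only [pvSp, if_neg hc, pvCamr, List.headD_cons, List.tail_cons, List.cons_append]
        rw [ih.1]; simp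
      · simp only [pvSp, if_neg hc, pvCamr, List.map_cons, List.flatten_cons, pvCap_cons,
          List.cons_append]
        rw [ih.1]; simp

-- ===== VERDICT (by name: the statement is the Claim_ definition above) =====
theorem convert_to_camel_spec : Claim_equal_convert_to_camel := by
  intro a _
  unfold Spec_convert_to_camel convert_to_camel convert_to_camel_alt
  rw [foldl_eq_pvCamr a.toList [] false, splitOn_eq_pvSp]
  congr 1
  rw [List.nil_append, ← (pvB_eq_pvCamr a.toList).1]
  congr 1
  rw [join_nil_eq_flatten, List.drop_one]
  rfl
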